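-- pv_equiv track=rewrite | github.com/Captainmorgan37/AirSprint-Tools | flight_following_reports.py | _format_seat_display
-- ===== SOURCE A (Python) =====
-- from typing import (
--     Any,
--     Callable,
--     Dict,
--     Iterable,
--     List,
--     Mapping,
--     MutableMapping,
--     Optional,
--     Sequence,
--     Tuple,
-- )
--
-- def _format_seat_display(seats: Iterable[str]) -> str:
--     ordered = []
--     seen = set()
--     for seat in sorted({(seat or "PIC").upper() for seat in seats if seat}, key=_seat_sort_key):
--         if seat not in seen:
--             ordered.append(seat)
--             seen.add(seat)
--     if not ordered:
--         return "Crew"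
--     return "+".join(ordered)
--
-- def _seat_sort_key(seat: str) -> Tuple[int, str]:
--     seat_upper = (seat or "").upper()
--     if seat_upper == "PIC":
--         return (0, seat_upper)
--     if seat_upper == "SIC":
--         return (1, seat_upper)
--     return (2, seat_upper)
-- ===== SOURCE B (Python) =====
-- def _before(a, b):
--     ra = 0 if a == "PIC" else (1 if a == "SIC" else 2)
--     rb = 0 if b == "PIC" else (1 if b == "SIC" else 2)
--     return ra < rb or (ra == rb and a < b)
--
-- def _insert_seat(u, acc):
--     if not acc:
--         return [u]
--     head = acc[0]
--     if u == head:
--         return acc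
--     if _before(u, head):
--         return [u] + acc
--     return [head] + _insert_seat(u, acc[1:])
--
-- def _format_seat_display(seats):
--     acc = []
--     for seat in seats:
--         if seat:
--             acc = _insert_seat(seat.upper(), acc)
--     return "+".join(acc) if acc else "Crew"
-- ===== Notes on version B (the rewrite author's own statement) =====
-- stated objective: alternative
-- what changed: Replaced A's set-comprehension dedup plus composite-key library sort plus a second dedup loop by a single pass over the input that maintains one sorted, duplicate-free accumulator via recursive ordered insertion (no set, no sort call).
import Mathlib
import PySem

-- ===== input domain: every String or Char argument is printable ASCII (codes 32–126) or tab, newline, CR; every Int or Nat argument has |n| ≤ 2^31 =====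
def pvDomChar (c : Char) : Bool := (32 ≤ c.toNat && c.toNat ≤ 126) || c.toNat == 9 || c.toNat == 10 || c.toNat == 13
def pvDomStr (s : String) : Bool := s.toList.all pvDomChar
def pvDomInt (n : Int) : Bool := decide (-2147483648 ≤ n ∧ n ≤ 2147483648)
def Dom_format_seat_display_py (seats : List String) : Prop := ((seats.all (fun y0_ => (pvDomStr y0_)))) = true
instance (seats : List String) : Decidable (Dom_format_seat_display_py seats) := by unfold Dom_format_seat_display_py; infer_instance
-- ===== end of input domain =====

-- B replaces A's set-comprehension dedup + composite-key library sort + second dedup loop by a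
-- single pass maintaining one sorted duplicate-free accumulator via recursive ordered insertion.


-- ===== PORT A =====
-- _seat_sort_key returns the tuple (rank, seat_upper); PySem.List.sorted2 takes the
-- two tuple components as separate key functions, so the helper is ported as a pair of them.
-- In `(seat or "").upper()` the `or` default only fires on the falsy "" and upper "" = "",
-- so it is ported as a plain upper.
def pvSeatKey1 (seat : String) : Int :=
  let seat_upper := PySem.Str.upper seat
  if seat_upper = "PIC" then 0 else if seat_upper = "SIC" then 1 else 2

def pvSeatKey2 (seat : String) : String :=
  PySem.Str.upper seat

def format_seat_display_py (seats : List String) : String :=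
  -- {(seat or "PIC").upper() for seat in seats if seat}
  let uniq : PySem.Set String :=
    PySem.Set.ofList ((seats.filter (fun s => s ≠ "")).map
      (fun seat => PySem.Str.upper (if seat = "" then "PIC" else seat)))
  -- sorted(…, key=_seat_sort_key)
  let srt := PySem.List.sorted2 uniq pvSeatKey1 pvSeatKey2
  -- the ordered/seen loop
  let fin := srt.foldl (fun (acc : List String × PySem.Set String) seat =>
      if PySem.Set.contains acc.2 seat then acc
      else (acc.1 ++ [seat], PySem.Set.add acc.2 seat)) ([], PySem.Set.empty)
  let ordered := fin.1
  if ordered = [] then "Crew" else PySem.Str.join "+" ordered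

-- ===== PORT B =====
-- _before(a, b): the tuple comparison (ra, a) < (rb, b) written out componentwise
def pvBefore (a b : String) : Bool :=
  let ra : Int := if a = "PIC" then 0 else if a = "SIC" then 1 else 2
  let rb : Int := if b = "PIC" then 0 else if b = "SIC" then 1 else 2
  decide (ra < rb) || (decide (ra = rb) && decide (a < b))

-- _insert_seat(u, acc): recursive ordered insertion, skipping an already-present label
def pvInsertSeat (u : String) (acc : List String) : List String :=
  match acc with
  | [] => [u]
  | head :: t =>
    if u = head then head :: t
    else if pvBefore u head then u :: head :: t
    else head :: pvInsertSeat u t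

def format_seat_display_py_alt (seats : List String) : String :=
  let acc := seats.foldl
    (fun acc seat => if seat = "" then acc else pvInsertSeat (PySem.Str.upper seat) acc) []
  if acc = [] then "Crew" else PySem.Str.join "+" acc

-- ===== PRECONDITION & SPEC =====
def Spec_format_seat_display_py (seats : List String) (out : String) : Prop := out = format_seat_display_py_alt seats
instance (seats : List String) (out : String) : Decidable (Spec_format_seat_display_py seats out) := by unfold Spec_format_seat_display_py; infer_instance

-- ===== CLAIM (what is proved, stated in full; the proofs are below) =====
def Claim_equal_format_seat_display_py : Prop := ∀ (seats : List String), Dom_format_seat_display_py seats → Spec_format_seat_display_py seats (format_seat_display_py seats)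

-- ===== LEMMAS AND PROOFS =====

-- uppercasing is idempotent
lemma pvUpperChar_idem (c : Char) :
    PySem.Chars.upperChar (PySem.Chars.upperChar c) = PySem.Chars.upperChar c := by
  unfold PySem.Chars.upperChar PySem.Chars.islower
  split_ifs with h h2
  · exfalso
    simp only [Bool.and_eq_true, decide_eq_true_eq] at h h2
    obtain ⟨h1, h1'⟩ := h
    obtain ⟨h3, h3'⟩ := h2
    simp [Char.le_def, UInt32.le_iff_toNat_le] at h1 h1' h3 h3'
    have hv : Nat.isValidChar (c.toNat - 32) := Or.inl (by omega)
    rw [show (Char.ofNat (c.toNat - 32)).toNat = c.toNat - 32 by simp [Char.toNat_ofNat, hv]] at h3 h3'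
    omega
  · rfl
  · rfl

lemma pvUpper_idem (s : String) :
    PySem.Str.upper (PySem.Str.upper s) = PySem.Str.upper s := by
  apply String.toList_inj.mp
  simp [PySem.Str.toList_upper, PySem.Chars.upper, List.map_map, Function.comp, pvUpperChar_idem]

-- the single lexicographic key behind A's (rank, seat_upper) tuple key
def pvK (seat : String) : Lex (Int × String) := toLex (pvSeatKey1 seat, pvSeatKey2 seat)

lemma pvSorted2_eq_sorted (xs : List String) :
    PySem.List.sorted2 xs pvSeatKey1 pvSeatKey2 = PySem.List.sorted xs pvK := by
  have hb : (fun a b : String => decide (pvSeatKey1 a < pvSeatKey1 b) ||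
        (!decide (pvSeatKey1 b < pvSeatKey1 a) && decide (pvSeatKey2 a < pvSeatKey2 b)))
      = fun a b : String => decide (pvK a < pvK b) := by
    funext a b
    by_cases h1 : pvSeatKey1 a < pvSeatKey1 b
    · simp [h1, pvK, Prod.Lex.lt_iff, not_lt.mpr h1.le]
    · by_cases h2 : pvSeatKey1 b < pvSeatKey1 a
      · simp [h1, h2, pvK, Prod.Lex.lt_iff]
        omega
      · have he : pvSeatKey1 a = pvSeatKey1 b := by omega
        simp [pvK, Prod.Lex.lt_iff, he]
  simp only [PySem.List.sorted2, PySem.List.sorted, hb, Bool.false_eq_true, if_false]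

-- the ordered/seen loop on a duplicate-free list returns the list itself
lemma pvDedup_loop (xs acc : List String) (seen : PySem.Set String)
    (h : xs.Nodup) (hs : ∀ x ∈ xs, PySem.Set.contains seen x = false) :
    (xs.foldl (fun (acc : List String × PySem.Set String) seat =>
      if PySem.Set.contains acc.2 seat then acc
      else (acc.1 ++ [seat], PySem.Set.add acc.2 seat)) (acc, seen)).1 = acc ++ xs := by
  induction xs generalizing acc seen with
  | nil => simp
  | cons x xs ih =>
    have hx : PySem.Set.contains seen x = false := hs x (by simp)
    simp only [List.foldl_cons, hx, Bool.false_eq_true, if_false]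
    rw [ih (acc ++ [x]) _ h.of_cons]
    · simp
    · intro y hy
      have hyx : y ≠ x := fun e => (List.nodup_cons.mp h).1 (e ▸ hy)
      have hyn : y ∉ seen := by
        intro hm
        have hc := (PySem.Set.contains_iff seen y).mpr hm
        rw [hs y (by simp [hy])] at hc
        exact Bool.false_ne_true hc
      have : ¬ y ∈ PySem.Set.add seen x := by
        rw [PySem.Set.mem_add]
        rintro (hm | rfl)
        · exact hyn hm
        · exact hyx rfl
      exact Bool.eq_false_iff.mpr (fun hc => this ((PySem.Set.contains_iff _ _).mp hc))

-- pvBefore agrees with A's key order on upper-fixed strings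
lemma pvBefore_iff (a b : String) (ha : PySem.Str.upper a = a) (hb : PySem.Str.upper b = b) :
    pvBefore a b = true ↔ pvK a < pvK b := by
  simp only [pvBefore, pvK, pvSeatKey1, pvSeatKey2, ha, hb, Prod.Lex.lt_iff, ofLex_toLex,
    Bool.or_eq_true, Bool.and_eq_true, decide_eq_true_eq]

-- the key is injective on upper-fixed strings
lemma pvK_inj (a b : String) (ha : PySem.Str.upper a = a) (hb : PySem.Str.upper b = b)
    (h : pvK a = pvK b) : a = b := by
  have := congrArg (fun x => (ofLex x).2) h
  simpa [pvK, pvSeatKey2, ha, hb] using this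

lemma pvK_total (a b : String) (ha : PySem.Str.upper a = a) (hb : PySem.Str.upper b = b)
    (hne : a ≠ b) : pvK a < pvK b ∨ pvK b < pvK a :=
  lt_or_gt_of_ne (fun e => hne (pvK_inj a b ha hb e))

-- membership through insertion
lemma pvMem_insertSeat (u x : String) (acc : List String) :
    x ∈ pvInsertSeat u acc ↔ x = u ∨ x ∈ acc := by
  induction acc with
  | nil => simp [pvInsertSeat]
  | cons head t ih =>
    by_cases h1 : u = head
    · subst h1; simp [pvInsertSeat]
    · by_cases h2 : pvBefore u head
      · simp [pvInsertSeat, h1, h2]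
      · simp [pvInsertSeat, h1, h2, ih]
        tauto

-- insertion preserves strict sortedness (wrt A's key) on upper-fixed strings
lemma pvPairwise_insertSeat (u : String) (acc : List String)
    (hu : PySem.Str.upper u = u) (hfix : ∀ x ∈ acc, PySem.Str.upper x = x)
    (hpw : acc.Pairwise (fun a b => pvK a < pvK b)) :
    (pvInsertSeat u acc).Pairwise (fun a b => pvK a < pvK b) := by
  induction acc with
  | nil => simp [pvInsertSeat]
  | cons head t ih =>
    have hh : PySem.Str.upper head = head := hfix head (by simp)
    by_cases h1 : u = head
    · subst h1; simpa [pvInsertSeat] using hpw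
    · by_cases h2 : pvBefore u head
      · have huh : pvK u < pvK head := (pvBefore_iff u head hu hh).mp h2
        simp only [pvInsertSeat, h1, if_false, h2, if_true]
        refine List.Pairwise.cons ?_ hpw
        intro b hb
        rcases List.mem_cons.mp hb with rfl | hbt
        · exact huh
        · exact lt_trans huh ((List.pairwise_cons.mp hpw).1 b hbt)
      · have hhu : pvK head < pvK u := by
          rcases pvK_total u head hu hh h1 with h | h
          · exact absurd ((pvBefore_iff u head hu hh).mpr h) (by simpa using h2)
          · exact h
        simp only [pvInsertSeat, h1, if_false, h2, if_false]
        refine List.Pairwise.cons ?_ (ih (fun x hx => hfix x (by simp [hx]))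
          (List.pairwise_cons.mp hpw).2)
        intro b hb
        rcases (pvMem_insertSeat u b t).mp hb with rfl | hbt
        · exact hhu
        · exact (List.pairwise_cons.mp hpw).1 b hbt

-- the invariant of B's single pass: accumulator stays upper-fixed, strictly sorted,
-- and holds exactly the uppercased truthy seats seen so far
lemma pvFold_inv (seats : List String) (acc : List String)
    (hfix : ∀ x ∈ acc, PySem.Str.upper x = x)
    (hpw : acc.Pairwise (fun a b => pvK a < pvK b)) :
    (∀ x ∈ seats.foldl
        (fun acc seat => if seat = "" then acc else pvInsertSeat (PySem.Str.upper seat) acc) acc,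
      PySem.Str.upper x = x) ∧
    (seats.foldl
        (fun acc seat => if seat = "" then acc else pvInsertSeat (PySem.Str.upper seat) acc) acc).Pairwise
        (fun a b => pvK a < pvK b) ∧
    (∀ x, x ∈ seats.foldl
        (fun acc seat => if seat = "" then acc else pvInsertSeat (PySem.Str.upper seat) acc) acc ↔
      x ∈ acc ∨ x ∈ (seats.filter (fun s => s ≠ "")).map PySem.Str.upper) := by
  induction seats generalizing acc with
  | nil => simpa using ⟨hfix, hpw⟩
  | cons seat rest ih =>
    by_cases hs : seat = ""
    · simpa [hs] using ih acc hfix hpw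
    · have hfix' : ∀ x ∈ pvInsertSeat (PySem.Str.upper seat) acc, PySem.Str.upper x = x := by
        intro x hx
        rcases (pvMem_insertSeat _ x acc).mp hx with rfl | hxa
        · exact pvUpper_idem seat
        · exact hfix x hxa
      have hpw' := pvPairwise_insertSeat (PySem.Str.upper seat) acc (pvUpper_idem seat) hfix hpw
      obtain ⟨i1, i2, i3⟩ := ih (pvInsertSeat (PySem.Str.upper seat) acc) hfix' hpw'
      refine ⟨by simpa [hs] using i1, by simpa [hs] using i2, ?_⟩
      intro x
      simp only [List.foldl_cons, hs, if_false, List.filter_cons,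
        decide_not]
      rw [if_pos (by simp)]
      rw [List.map_cons, i3 x, pvMem_insertSeat]
      simp
      tauto

-- strict sortedness implies no duplicates
lemma pvNodup_of_pairwise (l : List String)
    (h : l.Pairwise (fun a b => pvK a < pvK b)) : l.Nodup :=
  h.imp (fun hlt => fun e => absurd (e ▸ hlt) (lt_irrefl _))

-- ===== VERDICT (by name: the statement is the Claim_ definition above) =====
theorem format_seat_display_py_spec : Claim_equal_format_seat_display_py := by
  intro seats _
  unfold Spec_format_seat_display_py format_seat_display_py format_seat_display_py_alt
  dsimp only
  have hmap : (seats.filter (fun s => s ≠ "")).map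
        (fun seat => PySem.Str.upper (if seat = "" then "PIC" else seat)) =
      (seats.filter (fun s => s ≠ "")).map PySem.Str.upper := by
    refine List.map_congr_left ?_
    intro s hs
    rw [if_neg (by simpa using (List.mem_filter.mp hs).2)]
  rw [hmap]
  set M := (seats.filter (fun s => s ≠ "")).map PySem.Str.upper with hM
  set L : PySem.Set String := PySem.Set.ofList M with hL
  have hndL : L.Nodup := PySem.Set.nodup_ofList _
  -- A's ordered list is the sorted form of L
  have hndS : (PySem.List.sorted L pvK).Nodup :=
    (PySem.List.sorted_perm _ _ _).nodup_iff.mpr hndL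
  rw [pvSorted2_eq_sorted, pvDedup_loop _ [] PySem.Set.empty hndS (by intro x _; rfl)]
  -- B's accumulator
  obtain ⟨hfix, hpw, hmem⟩ := pvFold_inv seats []
    (by intro x hx; cases hx) List.Pairwise.nil
  set r := seats.foldl
    (fun acc seat => if seat = "" then acc else pvInsertSeat (PySem.Str.upper seat) acc) []
    with hr
  have hperm : r.Perm L := by
    rw [List.perm_ext_iff_of_nodup (pvNodup_of_pairwise r hpw) hndL]
    intro x
    rw [hmem x, hL, PySem.Set.mem_ofList, hM]
    simp
  rw [List.nil_append, PySem.List.sorted_eq_of_perm_of_pairwise_lt _ _ _ hperm hpw]
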